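-- pv_equiv track=rewrite | github.com/danielhazan/proj2nlp | ex2NLP.py | findTagsOf
-- ===== SOURCE A (Python) =====
-- def findTagsOf(trainText, taggedText):
--     """return a tag for each word in trainText"""
--
--     wordsToTags = []
--
--     for tuple in taggedText:
--         for word in trainText:
--             if word[0] == tuple[0]:
--                 wordsToTags.append((word[0],tuple[1]))
--         continue
--
--     return wordsToTags
-- ===== SOURCE B (Python) =====
-- def findTagsOf(trainText, taggedText):
--     """return a tag for each word in trainText"""
--     counts = {}
--     for word in trainText:
--         counts[word[0]] = counts.get(word[0], 0) + 1
--     wordsToTags = []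
--     for tup in taggedText:
--         wordsToTags.extend([(tup[0], tup[1])] * counts.get(tup[0], 0))
--     return wordsToTags
-- ===== Notes on version B (the rewrite author's own statement) =====
-- stated objective: alternative
-- what changed: Replaces the nested scan of trainText for every tagged pair by a word-count dictionary built in one pass, then emits count copies of (word, tag) per tagged pair.
import Mathlib
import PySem

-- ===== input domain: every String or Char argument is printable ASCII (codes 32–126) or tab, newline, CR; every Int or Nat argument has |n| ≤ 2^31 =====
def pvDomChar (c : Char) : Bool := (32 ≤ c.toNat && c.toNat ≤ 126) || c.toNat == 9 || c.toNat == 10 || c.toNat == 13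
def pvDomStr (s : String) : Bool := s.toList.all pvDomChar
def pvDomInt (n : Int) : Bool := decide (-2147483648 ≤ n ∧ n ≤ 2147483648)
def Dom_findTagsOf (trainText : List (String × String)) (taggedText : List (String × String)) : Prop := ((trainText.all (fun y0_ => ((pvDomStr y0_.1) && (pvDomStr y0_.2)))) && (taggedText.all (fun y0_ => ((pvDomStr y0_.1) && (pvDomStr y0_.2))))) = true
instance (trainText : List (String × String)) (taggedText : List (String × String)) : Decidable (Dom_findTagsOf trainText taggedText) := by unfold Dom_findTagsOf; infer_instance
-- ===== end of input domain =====

-- ===== PORT A =====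
def findTagsOf (trainText : List (String × String)) (taggedText : List (String × String)) : List (String × String) :=
  taggedText.foldl (fun wordsToTags tup =>
    trainText.foldl (fun acc word =>
      if word.1 == tup.1 then acc ++ [(word.1, tup.2)] else acc) wordsToTags) []

-- ===== PORT B =====
-- B: one counting pass over trainText, then emit count copies per tagged pair.
def findTagsOf_alt (trainText : List (String × String)) (taggedText : List (String × String)) : List (String × String) :=
  let counts : PySem.Dict String Int :=
    trainText.foldl (fun d word => d.modify word.1 0 (· + 1)) PySem.Dict.empty
  taggedText.foldl (fun wordsToTags tup =>
    wordsToTags ++ List.replicate (counts.getD tup.1 0).toNat (tup.1, tup.2)) []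

-- ===== PRECONDITION & SPEC =====
def Spec_findTagsOf (trainText : List (String × String)) (taggedText : List (String × String)) (out : List (String × String)) : Prop := out = findTagsOf_alt trainText taggedText
instance (trainText : List (String × String)) (taggedText : List (String × String)) (out : List (String × String)) : Decidable (Spec_findTagsOf trainText taggedText out) := by unfold Spec_findTagsOf; infer_instance

-- ===== CLAIM (what is proved, stated in full; the proofs are below) =====
def Claim_equal_findTagsOf : Prop := ∀ (trainText : List (String × String)) (taggedText : List (String × String)), Dom_findTagsOf trainText taggedText → Spec_findTagsOf trainText taggedText (findTagsOf trainText taggedText)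

-- ===== LEMMAS AND PROOFS =====

lemma counts_getD (trainText : List (String × String)) (k : String) :
    (trainText.foldl (fun d word => d.modify word.1 0 (· + 1)) (PySem.Dict.empty : PySem.Dict String Int)).getD k 0
      = ((trainText.map Prod.fst).count k : Int) := by
  have h : trainText.foldl (fun d word => d.modify word.1 0 (· + 1)) (PySem.Dict.empty : PySem.Dict String Int)
      = PySem.Dict.counter (trainText.map Prod.fst) := by
    rw [PySem.Dict.counter_eq_foldl, List.foldl_map]
  rw [h, PySem.Dict.getD_counter]

lemma inner_fold (trainText : List (String × String)) (t s : String)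
    (acc : List (String × String)) :
    trainText.foldl (fun a word => if word.1 == t then a ++ [(word.1, s)] else a) acc
      = acc ++ List.replicate ((trainText.map Prod.fst).count t) (t, s) := by
  induction trainText generalizing acc with
  | nil => simp
  | cons w ws ih =>
    rw [List.foldl_cons]
    by_cases hw : w.1 = t
    · rw [if_pos (beq_iff_eq.mpr hw), ih, hw]
      simp [hw, List.replicate_succ]
    · rw [if_neg (by simp [hw]), ih]
      simp [hw]

lemma outer_fold (trainText taggedText : List (String × String))
    (acc : List (String × String)) :
    taggedText.foldl (fun wordsToTags tup =>
      trainText.foldl (fun a word =>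
        if word.1 == tup.1 then a ++ [(word.1, tup.2)] else a) wordsToTags) acc
    = taggedText.foldl (fun wordsToTags tup =>
        wordsToTags ++ List.replicate
          (((trainText.foldl (fun d word => d.modify word.1 0 (· + 1))
              (PySem.Dict.empty : PySem.Dict String Int)).getD tup.1 0).toNat) (tup.1, tup.2)) acc := by
  induction taggedText generalizing acc with
  | nil => rfl
  | cons tup rest ih =>
    rw [List.foldl_cons, List.foldl_cons, inner_fold, counts_getD, Int.toNat_natCast]
    exact ih _

-- ===== VERDICT (by name: the statement is the Claim_ definition above) =====
theorem findTagsOf_spec : Claim_equal_findTagsOf := by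
  intro trainText taggedText _
  unfold Spec_findTagsOf findTagsOf findTagsOf_alt
  exact outer_fold trainText taggedText []
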